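-- pv_equiv track=rewrite | github.com/baiwan-chenhao/rewrite | leetcode_gen_week2.py | solve
-- ===== SOURCE A (Python) =====
-- from typing import List, Tuple
--
-- def solve(nums: List[int], k: int) -> int:
--     from collections import deque
--     n = len(nums)
--     ans = cnt = 0
--     q = deque()  # (根节点的值, 树的大小)
--     r = n - 1
--     for l in range(n - 1, -1, -1):
--         # x 进入窗口
--         x = nums[l]
--         size = 1  # 统计以 x 为根的树的大小
--         while q and x >= q[-1][0]:
--             # 以 v 为根的树，现在合并到 x 的下面（x 和 v 连一条边）
--             v, sz = q.pop()
--             size += sz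
--             cnt += (x - v) * sz  # 树 v 中的数都变成 x
--         q.append([x, size])
--
--         # 操作次数太多，缩小窗口
--         while cnt > k:
--             # 操作次数的减少量，等于 nums[r] 所在树的根节点值减去 nums[r]
--             tree = q[0]  # 最右边的树
--             cnt -= tree[0] - nums[r]
--             r -= 1
--             # nums[r] 离开窗口后，树的大小减一
--             tree[1] -= 1
--             if tree[1] == 0:  # 这棵树是空的
--                 q.popleft()
--
--         ans += r - l + 1
--
--     return ans
-- ===== SOURCE B (Python) =====
-- def solve(nums, k):
--     n = len(nums)
--     ans = 0
--     for l in range(n):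
--         mx = nums[l]
--         cost = 0
--         for r in range(l, n):
--             if nums[r] > mx:
--                 mx = nums[r]
--             cost += mx - nums[r]
--             if cost > k:
--                 break
--             ans += 1
--     return ans
-- ===== Notes on version B (the rewrite author's own statement) =====
-- stated objective: simpler
-- what changed: Replaces the monotonic-deque sliding window (merging 'trees' and shrinking the right pointer) by a direct O(n^2) scan: for each left index recompute the make-nondecreasing cost with a running max and break at the first right index whose cost exceeds k.
-- crash fix: For k < 0 with nonempty nums, A raises IndexError (its shrink loop empties the deque and reads q[0]); B returns 0, the correct count since no subarray has cost <= k < 0. — e.g. on solve([1], -1): A raises IndexError, B returns 0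
import Mathlib
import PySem

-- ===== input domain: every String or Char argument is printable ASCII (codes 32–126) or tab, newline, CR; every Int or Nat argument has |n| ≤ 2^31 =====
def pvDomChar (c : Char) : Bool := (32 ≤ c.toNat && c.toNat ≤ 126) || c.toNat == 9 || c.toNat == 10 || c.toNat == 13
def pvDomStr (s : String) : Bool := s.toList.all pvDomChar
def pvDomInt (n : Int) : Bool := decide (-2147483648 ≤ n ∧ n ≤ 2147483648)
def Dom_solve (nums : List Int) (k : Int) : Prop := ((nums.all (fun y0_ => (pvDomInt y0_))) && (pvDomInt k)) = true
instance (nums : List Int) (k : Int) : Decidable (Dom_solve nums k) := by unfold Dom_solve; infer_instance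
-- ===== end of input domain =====

-- B replaces A's monotonic-deque sliding window by a direct quadratic scan (simpler, not faster):
-- for each left index, recompute the cost with a running max and break once it exceeds k.

-- ===== PORT A =====
-- while q and x >= q[-1][0]: v, sz = q.pop(); size += sz; cnt += (x - v) * sz
-- Lean list head = python deque back q[-1] (the deque is stored reversed).
def mergeLoop (x : Int) : List (Int × Int) → Int → Int → List (Int × Int) × Int × Int
  | [], size, cnt => ([], size, cnt)
  | (v, sz) :: rest, size, cnt =>
    if x ≥ v then mergeLoop x rest (size + sz) (cnt + (x - v) * sz)
    else ((v, sz) :: rest, size, cnt)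

-- while cnt > k: tree = q[0]; cnt -= tree[0] - nums[r]; r -= 1; tree[1] -= 1; if tree[1] == 0: q.popleft()
-- python q[0] = last of the Lean list; fuel only makes the loop total (never exhausted under Pre_;
-- the 'none' branch is where python raises IndexError, excluded by Pre_).
def shrinkLoop (nums : List Int) (k : Int) : Nat → Int → Int → List (Int × Int) → Int × Int × List (Int × Int)
  | 0, cnt, r, q => (cnt, r, q)
  | fuel + 1, cnt, r, q =>
    if cnt > k then
      match q.getLast? with
      | none => (cnt, r, q)
      | some (v, sz) =>
        let cnt' := cnt - (v - PySem.List.pyGetD nums r 0)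
        let r' := r - 1
        let sz' := sz - 1
        let q' := q.dropLast ++ (if sz' = 0 then [] else [(v, sz')])
        shrinkLoop nums k fuel cnt' r' q'
    else (cnt, r, q)

def stepA (nums : List Int) (k : Int) (st : Int × Int × List (Int × Int) × Int) (l : Int) :
    Int × Int × List (Int × Int) × Int :=
  let x := PySem.List.pyGetD nums l 0
  let (q1, size, cnt1) := mergeLoop x st.2.2.1 1 st.2.1
  let q2 := (x, size) :: q1
  let (cnt2, r2, q3) := shrinkLoop nums k (nums.length + 1) cnt1 st.2.2.2 q2
  (st.1 + (r2 - l + 1), cnt2, q3, r2)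

def solve (nums : List Int) (k : Int) : Int :=
  let n : Int := nums.length
  ((PySem.List.pyRange (n - 1) (-1) (-1)).foldl (stepA nums k) (0, 0, [], n - 1)).1

-- ===== PORT B =====
-- inner loop: for r in range(l, n) with break; fuel = n - l steps remain, never exhausted.
def innerB (nums : List Int) (k n : Int) : Nat → Int → Int → Int → Int → Int
  | 0, _, _, _, ans => ans
  | fuel + 1, r, mx, cost, ans =>
    if r < n then
      let v := PySem.List.pyGetD nums r 0
      let mx' := if v > mx then v else mx
      let cost' := cost + (mx' - v)
      if cost' > k then ans else innerB nums k n fuel (r + 1) mx' cost' (ans + 1)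
    else ans

def solve_alt (nums : List Int) (k : Int) : Int :=
  let n : Int := nums.length
  (PySem.List.pyRange 0 n 1).foldl
    (fun ans l => innerB nums k n nums.length l (PySem.List.pyGetD nums l 0) 0 ans) 0

-- ===== PRECONDITION & SPEC =====
-- Pre_ excludes exactly the inputs where A raises IndexError: k < 0 with nonempty nums
-- (the shrink loop then empties the deque and reads q[0]).
def Pre_solve (nums : List Int) (k : Int) : Prop := 0 ≤ k ∨ nums = []
instance (nums : List Int) (k : Int) : Decidable (Pre_solve nums k) := by unfold Pre_solve; infer_instance
def pvWitness_solve : List Int × Int := ([3, 1, 2], 2)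

-- For k < 0 and nums ≠ [], A raises IndexError; B returns 0 (no subarray has cost ≤ k < 0).
def Raises_solve (nums : List Int) (k : Int) : Prop := k < 0 ∧ nums ≠ []
instance (nums : List Int) (k : Int) : Decidable (Raises_solve nums k) := by unfold Raises_solve; infer_instance
def pvRaiseWitness_solve : List Int × Int := ([1], -1)
def pvRaiseWitnessOut_solve : Int := 0

def Spec_solve (nums : List Int) (k : Int) (out : Int) : Prop := out = solve_alt nums k
instance (nums : List Int) (k : Int) (out : Int) : Decidable (Spec_solve nums k out) := by unfold Spec_solve; infer_instance

-- ===== CLAIM (what is proved, stated in full; the proofs are below) =====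
def Claim_equal_solve : Prop := ∀ (nums : List Int) (k : Int), Dom_solve nums k → Pre_solve nums k → Spec_solve nums k (solve nums k)
def Claim_raises_solve : Prop := (∀ (nums : List Int) (k : Int), Dom_solve nums k → Raises_solve nums k → ¬ Pre_solve nums k) ∧ (Dom_solve (pvRaiseWitness_solve.1) (pvRaiseWitness_solve.2) ∧ Raises_solve (pvRaiseWitness_solve.1) (pvRaiseWitness_solve.2) ∧ solve_alt (pvRaiseWitness_solve.1) (pvRaiseWitness_solve.2) = pvRaiseWitnessOut_solve)

-- ===== LEMMAS AND PROOFS =====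

-- prefix maxima of a list
def pm : List Int → List Int
  | [] => []
  | x :: xs => x :: (pm xs).map (max x)

-- cost of making the first m elements nondecreasing (raise each to its prefix max)
def cst (s : List Int) (m : Nat) : Int := ((pm s).take m).sum - (s.take m).sum

-- the answer contributed by one left endpoint: largest m ≤ |s| with cst s m ≤ k
def F (s : List Int) (k : Int) : Nat := Nat.findGreatest (fun m => cst s m ≤ k) s.length

-- expand a deque (head = leftmost tree) to the list of root values
def expand : List (Int × Int) → List Int
  | [] => []
  | (v, sz) :: rest => List.replicate sz.toNat v ++ expand rest

theorem pm_length (s : List Int) : (pm s).length = s.length := by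
  induction s with
  | nil => rfl
  | cons x xs ih => simp [pm, ih]

theorem pm_sorted (s : List Int) : List.Pairwise (· ≤ ·) (pm s) := by
  induction s with
  | nil => simp [pm]
  | cons x xs ih =>
    refine List.Pairwise.cons ?_ (List.Pairwise.map _ (fun a b hab => max_le_max le_rfl hab) ih)
    intro y hy
    rcases List.mem_map.mp hy with ⟨z, _, rfl⟩
    exact le_max_left _ _

theorem pm_get_ge (s : List Int) (j : Nat) (h : j < s.length) :
    s[j] ≤ (pm s)[j]'(by rw [pm_length]; exact h) := by
  induction s generalizing j with
  | nil => simp at h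
  | cons x xs ih =>
    cases j with
    | zero => simp [pm]
    | succ j =>
      have hj : j < xs.length := by simpa using h
      have := ih j hj
      simp only [pm, List.getElem_cons_succ,
        List.getElem_map]
      exact le_trans this (le_max_right _ _)

theorem pm_get_zero (s : List Int) (h : 0 < s.length) :
    (pm s)[0]'(by rw [pm_length]; exact h) = s[0] := by
  cases s with
  | nil => simp at h
  | cons x xs => simp [pm]

theorem pm_get_succ (s : List Int) (j : Nat) (h : j + 1 < s.length) :
    (pm s)[j+1]'(by rw [pm_length]; omega) = max ((pm s)[j]'(by rw [pm_length]; omega)) (s[j+1]) := by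
  induction s generalizing j with
  | nil => simp at h
  | cons x xs ih =>
    cases j with
    | zero =>
      have hx : 0 < xs.length := by simpa using h
      have h0 : (pm xs)[0]'(by rw [pm_length]; exact hx) = xs[0] := pm_get_zero xs hx
      simp [pm, h0]
    | succ j =>
      have hj : j + 1 < xs.length := by simpa using h
      have := ih j hj
      simp only [pm, List.getElem_cons_succ, List.getElem_map, this]
      simp only [max_assoc]

theorem cst_zero (s : List Int) : cst s 0 = 0 := by simp [cst]

theorem cst_succ (s : List Int) (m : Nat) (h : m < s.length) :
    cst s (m + 1) = cst s m + ((pm s)[m]'(by rw [pm_length]; exact h) - s[m]) := by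
  unfold cst
  rw [List.sum_take_succ s m h, List.sum_take_succ (pm s) m (by rw [pm_length]; exact h)]
  ring

theorem cst_mono (s : List Int) (m : Nat) (h : m < s.length) : cst s m ≤ cst s (m + 1) := by
  rw [cst_succ s m h]
  have := pm_get_ge s m h
  omega

theorem cst_le_of_le (s : List Int) (m₁ m₂ : Nat) (h : m₁ ≤ m₂) (h₂ : m₂ ≤ s.length) :
    cst s m₁ ≤ cst s m₂ := by
  induction m₂ with
  | zero =>
    have : m₁ = 0 := by omega
    subst this; exact le_refl _
  | succ m ih =>
    rcases Nat.lt_or_ge m₁ (m+1) with hlt | hge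
    · exact le_trans (ih (by omega) (by omega)) (cst_mono s m (by omega))
    · have : m₁ = m + 1 := by omega
      subst this; exact le_refl _

theorem cst_cons_ge (x : Int) (s : List Int) (m : Nat) :
    cst s m ≤ cst (x :: s) (m + 1) := by
  unfold cst
  simp only [pm, List.take_succ_cons, List.sum_cons, ← List.map_take]
  have hle : (List.take m s).sum ≤ (List.take m s).sum := le_refl _
  have h2 : ((pm s).take m).sum ≤ (((pm s).take m).map (max x)).sum := by
    have := List.sum_le_sum (l := (pm s).take m) (f := id) (g := max x)
      (fun i _ => le_max_right x i)
    simpa using this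
  omega

theorem F_le (s : List Int) (k : Int) : F s k ≤ s.length := Nat.findGreatest_le _

theorem F_feas (s : List Int) (k : Int) (hk : 0 ≤ k) : cst s (F s k) ≤ k := by
  have h0 : cst s 0 ≤ k := by rw [cst_zero]; exact hk
  unfold F
  exact Nat.findGreatest_spec (P := fun m => cst s m ≤ k) (Nat.zero_le _) h0

theorem le_F (s : List Int) (k : Int) (m : Nat) (hm : m ≤ s.length) (h : cst s m ≤ k) : m ≤ F s k :=
  Nat.le_findGreatest hm h

theorem F_char (s : List Int) (k : Int) (hk : 0 ≤ k) (m : Nat) (hm : m ≤ s.length)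
    (hfeas : cst s m ≤ k) (hmax : m = s.length ∨ ¬ cst s (m + 1) ≤ k) : m = F s k := by
  have h1 : m ≤ F s k := le_F s k m hm hfeas
  rcases Nat.lt_or_ge m (F s k) with hlt | hge
  · exfalso
    rcases hmax with hlen | hinfeas
    · have := F_le s k; omega
    · have hF : cst s (F s k) ≤ k := F_feas s k hk
      have : cst s (m + 1) ≤ cst s (F s k) := cst_le_of_le s (m+1) (F s k) (by omega) (F_le s k)
      exact hinfeas (le_trans this hF)
  · omega

theorem F_cons_le (x : Int) (s : List Int) (k : Int) (hk : 0 ≤ k) : F (x :: s) k ≤ F s k + 1 := by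
  rcases Nat.eq_zero_or_pos (F (x :: s) k) with h0 | hpos
  · omega
  · obtain ⟨mm, hmm⟩ : ∃ mm, F (x :: s) k = mm + 1 := ⟨F (x :: s) k - 1, by omega⟩
    have hfeas : cst (x :: s) (mm + 1) ≤ k := by rw [← hmm]; exact F_feas _ k hk
    have : cst s mm ≤ k := le_trans (cst_cons_ge x s mm) hfeas
    have hlen : mm ≤ s.length := by have := F_le (x :: s) k; simp at this; omega
    have := le_F s k mm hlen this
    omega

theorem expand_append (a b : List (Int × Int)) : expand (a ++ b) = expand a ++ expand b := by
  induction a with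
  | nil => simp [expand]
  | cons p rest ih => cases p; simp [expand, ih]

theorem mergeLoop_spec (x : Int) :
    ∀ (q : List (Int × Int)) (size cnt : Int), 1 ≤ size → (∀ p ∈ q, 1 ≤ p.2) →
      List.Pairwise (· ≤ ·) (expand q) →
      ∃ q2 size2 cnt2, mergeLoop x q size cnt = (q2, size2, cnt2) ∧ 1 ≤ size2 ∧
        (∀ p ∈ q2, 1 ≤ p.2) ∧
        List.replicate size2.toNat x ++ expand q2
          = List.replicate size.toNat x ++ (expand q).map (max x) ∧
        cnt2 = cnt + (((expand q).map (max x)).sum - (expand q).sum) := by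
  intro q
  induction q with
  | nil =>
    intro size cnt hsize _ _
    exact ⟨[], size, cnt, rfl, hsize, by simp, by simp [expand], by simp [expand]⟩
  | cons p rest ih =>
    rcases p with ⟨v, sz⟩
    intro size cnt hsize hq hpw
    have hsz : (1:Int) ≤ sz := hq (v, sz) (by simp)
    have hexp : expand ((v, sz) :: rest) = List.replicate sz.toNat v ++ expand rest := rfl
    by_cases hxv : x ≥ v
    · have hpw' : List.Pairwise (· ≤ ·) (expand rest) :=
        List.Pairwise.sublist (by rw [hexp] at hpw ⊢; exact List.sublist_append_right _ _) hpw
      obtain ⟨q2, size2, cnt2, heq, h1, h2, hrep, hcnt⟩ :=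
        ih (size + sz) (cnt + (x - v) * sz) (by omega) (fun p hp => hq p (by simp [hp])) hpw'
      refine ⟨q2, size2, cnt2, ?_, h1, h2, ?_, ?_⟩
      · rw [mergeLoop, if_pos hxv]; exact heq
      · rw [hrep, hexp]
        rw [List.map_append, List.map_replicate, max_eq_left hxv]
        rw [show (size + sz).toNat = size.toNat + sz.toNat from Int.toNat_add (by omega) (by omega),
          List.replicate_add, List.append_assoc]
      · rw [hcnt, hexp]
        simp only [List.map_append, List.sum_append, List.map_replicate, List.sum_replicate,
          nsmul_eq_mul, max_eq_left hxv]
        have : ((sz.toNat : Nat) : Int) = sz := Int.toNat_of_nonneg (by omega)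
        rw [this]
        ring
    · refine ⟨(v, sz) :: rest, size, cnt, ?_, hsize, hq, ?_, ?_⟩
      · rw [mergeLoop, if_neg hxv]
      · have hid : (expand ((v, sz) :: rest)).map (max x) = expand ((v, sz) :: rest) := by
          have hall : ∀ y ∈ expand ((v, sz) :: rest), max x y = y := by
            intro y hy
            rw [hexp] at hy hpw
            have hvy : v ≤ y := by
              rcases List.mem_append.mp hy with hy1 | hy2
              · rcases (List.mem_replicate.mp hy1) with ⟨_, rfl⟩; exact le_refl _
              · have hvmem : v ∈ List.replicate sz.toNat v := by
                  rw [List.mem_replicate]; exact ⟨by omega, rfl⟩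
                exact (List.pairwise_append.mp hpw).2.2 v hvmem y hy2
            exact max_eq_right (by omega)
          calc (expand ((v, sz) :: rest)).map (max x)
              = (expand ((v, sz) :: rest)).map id := List.map_congr_left (by simpa using hall)
            _ = expand ((v, sz) :: rest) := List.map_id _
        rw [hid]
      · have hid : (expand ((v, sz) :: rest)).map (max x) = expand ((v, sz) :: rest) := by
          have hall : ∀ y ∈ expand ((v, sz) :: rest), max x y = y := by
            intro y hy
            rw [hexp] at hy hpw
            have hvy : v ≤ y := by
              rcases List.mem_append.mp hy with hy1 | hy2
              · rcases (List.mem_replicate.mp hy1) with ⟨_, rfl⟩; exact le_refl _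
              · have hvmem : v ∈ List.replicate sz.toNat v := by
                  rw [List.mem_replicate]; exact ⟨by omega, rfl⟩
                exact (List.pairwise_append.mp hpw).2.2 v hvmem y hy2
            exact max_eq_right (by omega)
          calc (expand ((v, sz) :: rest)).map (max x)
              = (expand ((v, sz) :: rest)).map id := List.map_congr_left (by simpa using hall)
            _ = expand ((v, sz) :: rest) := List.map_id _
        rw [hid]; ring

theorem shrinkLoop_spec (nums : List Int) (k : Int) (hk : 0 ≤ k) (l : Nat) (hl : l ≤ nums.length) :
    ∀ (fuel m : Nat) (q : List (Int × Int)),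
      m ≤ nums.length - l → m ≤ fuel →
      (∀ p ∈ q, 1 ≤ p.2) →
      expand q = (pm (nums.drop l)).take m →
      ∃ m' q',
        shrinkLoop nums k fuel (cst (nums.drop l) m) ((l : Int) + m - 1) q
          = (cst (nums.drop l) m', (l : Int) + m' - 1, q') ∧
        m' ≤ m ∧ (∀ p ∈ q', 1 ≤ p.2) ∧ expand q' = (pm (nums.drop l)).take m' ∧
        cst (nums.drop l) m' ≤ k ∧ (m' = m ∨ ¬ cst (nums.drop l) (m' + 1) ≤ k) := by
  intro fuel
  induction fuel with
  | zero =>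
    intro m q hm hmf hq hexp
    have hm0 : m = 0 := by omega
    subst hm0
    exact ⟨0, q, rfl, le_refl _, hq, hexp, by rw [cst_zero]; exact hk, Or.inl rfl⟩
  | succ fuel ih =>
    intro m q hm hmf hq hexp
    by_cases hgt : cst (nums.drop l) m > k
    · have hm1 : 1 ≤ m := by
        by_contra h
        have : m = 0 := by omega
        subst this
        rw [cst_zero] at hgt; omega
      have hlenpm : ((pm (nums.drop l)).take m).length = m := by
        rw [List.length_take, pm_length, List.length_drop]; omega
      have hqne : q ≠ [] := by
        intro h; subst h
        have : (0:Nat) = m := by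
          have := hlenpm; rw [← hexp] at this; simpa [expand] using this
        omega
      rcases (List.eq_nil_or_concat q).resolve_left hqne with ⟨ys, ⟨v, sz⟩, hys⟩
      rw [List.concat_eq_append] at hys
      subst hys
      have hsz : (1:Int) ≤ sz := hq (v, sz) (by simp)
      have hgl : (ys ++ [(v, sz)]).getLast? = some (v, sz) := List.getLast?_concat
      have hexpq : expand (ys ++ [(v, sz)]) = expand ys ++ List.replicate sz.toNat v := by
        rw [expand_append]; simp [expand]
      -- the root of the last tree is the last prefix maximum of the window
      have hvm : v = (pm (nums.drop l))[m - 1]'(by rw [pm_length, List.length_drop]; omega) := by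
        have h1 : (expand (ys ++ [(v, sz)])).getLast? = some v := by
          rw [hexpq]
          rw [List.getLast?_append]
          have hrep : (List.replicate sz.toNat v).getLast? = some v := by
            simp [List.getLast?_eq_getElem?, List.getElem?_replicate]
            omega
          rw [hrep, Option.some_or]
        have h2 : (expand (ys ++ [(v, sz)])).getLast? =
            some ((pm (nums.drop l))[m - 1]'(by rw [pm_length, List.length_drop]; omega)) := by
          rw [hexp, List.getLast?_eq_getElem?, hlenpm]
          rw [List.getElem?_take]
          rw [if_pos (by omega)]
          rw [List.getElem?_eq_getElem (by rw [pm_length, List.length_drop]; omega)]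
        rw [h1] at h2
        exact Option.some.inj h2
      -- nums[r] is s[m-1]
      have hnum : PySem.List.pyGetD nums ((l : Int) + m - 1) 0
          = (nums.drop l)[m - 1]'(by rw [List.length_drop]; omega) := by
        have hcast : (l : Int) + m - 1 = ((l + (m - 1) : Nat) : Int) := by push_cast; omega
        rw [hcast, PySem.List.pyGetD_natCast,
          List.getD_eq_getElem nums 0 (by omega)]
        rw [List.getElem_drop]
      have hcnt' : cst (nums.drop l) m
            - (v - (nums.drop l)[m - 1]'(by rw [List.length_drop]; omega))
          = cst (nums.drop l) (m - 1) := by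
        have hm1' : m - 1 + 1 = m := by omega
        have := cst_succ (nums.drop l) (m - 1) (by rw [List.length_drop]; omega)
        rw [hm1'] at this
        rw [this, hvm]
        ring
      -- the new deque after removing one element from the last tree
      have hq' : ∀ p ∈ ys ++ (if sz - 1 = 0 then [] else [(v, sz - 1)]), (1:Int) ≤ p.2 := by
        intro p hp
        rcases List.mem_append.mp hp with h1 | h2
        · exact hq p (by simp [h1])
        · by_cases hsz1 : sz - 1 = 0
          · rw [if_pos hsz1] at h2; simp at h2
          · rw [if_neg hsz1] at h2
            simp at h2
            subst h2
            simp
            omega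
      have hexp' : expand (ys ++ (if sz - 1 = 0 then [] else [(v, sz - 1)]))
          = (pm (nums.drop l)).take (m - 1) := by
        have hdl : (pm (nums.drop l)).take (m - 1)
            = ((pm (nums.drop l)).take m).dropLast := by
          rw [List.dropLast_eq_take, List.take_take, hlenpm]
          congr 1
          omega
        rw [hdl, ← hexp, hexpq]
        rw [List.dropLast_append_of_ne_nil (by
          intro h
          have := List.length_replicate (n := sz.toNat) (a := v)
          rw [h] at this
          simp at this
          omega)]
        rw [expand_append]
        congr 1
        by_cases hsz1 : sz - 1 = 0
        · rw [if_pos hsz1]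
          have : sz.toNat = 1 := by omega
          simp [expand, this]
        · rw [if_neg hsz1]
          have h2 : sz.toNat = (sz - 1).toNat + 1 := by omega
          simp only [expand, List.append_nil]
          rw [h2, List.replicate_add]
          simp
      obtain ⟨m', q'', heq, hle, hq'', hexp'', hfeas, hdisj⟩ :=
        ih (m - 1) (ys ++ (if sz - 1 = 0 then [] else [(v, sz - 1)]))
          (by omega) (by omega) hq' hexp'
      refine ⟨m', q'', ?_, by omega, hq'', hexp'', hfeas, ?_⟩
      · rw [shrinkLoop, if_pos hgt, hgl]
        simp only [hnum, List.dropLast_concat]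
        have hr : (l : Int) + m - 1 - 1 = (l : Int) + (m - 1 : Nat) - 1 := by omega
        have hc : cst (nums.drop l) m
              - (v - (nums.drop l)[m - 1]'(by rw [List.length_drop]; omega))
            = cst (nums.drop l) (m - 1) := hcnt'
        rw [hc] at *
        rw [hr]
        exact heq
      · rcases hdisj with h | h
        · right
          have : m' + 1 = m := by omega
          rw [this]
          omega
        · exact Or.inr h
    · refine ⟨m, q, ?_, le_refl _, hq, hexp, by omega, Or.inl rfl⟩
      rw [shrinkLoop, if_neg hgt]

theorem foldA_spec (nums : List Int) (k : Int) (hk : 0 ≤ k) :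
    ∀ (j : Nat) (hj : j ≤ nums.length) (ans : Int) (q : List (Int × Int)),
      (∀ p ∈ q, 1 ≤ p.2) →
      expand q = (pm (nums.drop j)).take (F (nums.drop j) k) →
      ∃ c' q' r',
        (PySem.List.pyRange ((j : Int) - 1) (-1) (-1)).foldl (stepA nums k)
          (ans, cst (nums.drop j) (F (nums.drop j) k), q, (j : Int) + (F (nums.drop j) k) - 1)
        = (ans + ((List.range j).map (fun l => (F (nums.drop l) k : Int))).sum, c', q', r') := by
  intro j
  induction j with
  | zero =>
    intro hj ans q hq hexp
    rw [PySem.List.pyRange_neg_one_eq_nil (by omega)]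
    refine ⟨cst (nums.drop 0) (F (nums.drop 0) k), q,
      ((0 : Nat) : Int) + (F (nums.drop 0) k : Int) - 1, ?_⟩
    simp only [List.foldl_nil, List.range_zero, List.map_nil, List.sum_nil, add_zero]
  | succ j ih =>
    intro hj ans q hq hexp
    have hjlt : j < nums.length := by omega
    have hcons : nums.drop j = nums[j] :: nums.drop (j + 1) := List.drop_eq_getElem_cons hjlt
    set s' := nums.drop (j + 1) with hs'
    set m := F s' k with hm
    have hmlen : m ≤ s'.length := F_le s' k
    have hs'len : s'.length = nums.length - (j + 1) := by rw [hs', List.length_drop]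
    -- unfold one step of the countdown range
    have hrange : PySem.List.pyRange (((j + 1 : Nat) : Int) - 1) (-1) (-1)
        = (j : Int) :: PySem.List.pyRange ((j : Int) - 1) (-1) (-1) := by
      have h1 : (((j + 1 : Nat) : Int) - 1) = (j : Int) := by push_cast; ring
      rw [h1, PySem.List.pyRange_neg_one_cons (by omega)]
    have hx : PySem.List.pyGetD nums (j : Int) 0 = nums[j] := by
      rw [PySem.List.pyGetD_natCast, List.getD_eq_getElem nums 0 hjlt]
    -- merge step
    have hpw : List.Pairwise (· ≤ ·) (expand q) := by
      rw [hexp]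
      exact List.Pairwise.sublist (List.take_sublist _ _) (pm_sorted s')
    obtain ⟨q1, size2, cnt1, hmerge, hsz1, hq1, hrep, hcnt1⟩ :=
      mergeLoop_spec nums[j] q 1 (cst s' m) le_rfl hq hpw
    -- the merged deque represents the prefix maxima of the longer window
    have hpmcons : pm (nums.drop j) = nums[j] :: (pm s').map (max nums[j]) := by
      rw [hcons]; rfl
    have hexp2 : expand ((nums[j], size2) :: q1) = (pm (nums.drop j)).take (m + 1) := by
      have : expand ((nums[j], size2) :: q1) = List.replicate size2.toNat nums[j] ++ expand q1 := rfl
      rw [this, hrep, hexp, hpmcons]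
      rw [List.take_succ_cons, ← List.map_take]
      rfl
    have hq2 : ∀ p ∈ (nums[j], size2) :: q1, (1:Int) ≤ p.2 := by
      intro p hp
      rcases List.mem_cons.mp hp with h | h
      · subst h; exact hsz1
      · exact hq1 p h
    -- the merged count is the cost of the longer window
    have hcst2 : cnt1 = cst (nums.drop j) (m + 1) := by
      rw [hcnt1, hexp]
      unfold cst
      rw [hpmcons, hcons, List.take_succ_cons, List.take_succ_cons, List.sum_cons, List.sum_cons,
        ← List.map_take]
      ring
    -- shrink step
    have hm1len : m + 1 ≤ nums.length - j := by omega
    obtain ⟨m', q3, hshrink, hm'le, hq3, hexp3, hfeas, hdisj⟩ :=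
      shrinkLoop_spec nums k hk j (by omega) (nums.length + 1) (m + 1)
        ((nums[j], size2) :: q1) hm1len (by omega) hq2 hexp2
    -- the window after shrinking is exactly the maximal feasible window
    have hm'F : m' = F (nums.drop j) k := by
      have hdroplen : (nums.drop j).length = nums.length - j := List.length_drop
      rcases hdisj with hEq | hinf
      · have h1 : m' ≤ F (nums.drop j) k :=
          le_F _ k m' (by omega) hfeas
        have h2 : F (nums.drop j) k ≤ m + 1 := by
          have := F_cons_le nums[j] s' k hk
          rw [← hcons] at this
          omega
        omega
      · exact F_char _ k hk m' (by omega) hfeas (Or.inr hinf)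
    -- assemble one iteration of the outer loop
    have hstep : stepA nums k
          (ans, cst s' m, q, ((j + 1 : Nat) : Int) + (m : Int) - 1) (j : Int)
        = (ans + (F (nums.drop j) k : Int), cst (nums.drop j) (F (nums.drop j) k), q3,
            (j : Int) + (F (nums.drop j) k : Int) - 1) := by
      unfold stepA
      simp only [hx, hmerge, hcst2]
      have hr0 : ((j + 1 : Nat) : Int) + (m : Int) - 1 = (j : Int) + ((m + 1 : Nat) : Int) - 1 := by
        push_cast; ring
      rw [hr0]
      rw [hshrink]
      rw [hm'F]
      have : (j : Int) + ((F (nums.drop j) k : Nat) : Int) - 1 - (j : Int) + 1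
          = (F (nums.drop j) k : Int) := by ring
      simp only [this]
    rw [hrange, List.foldl_cons, hstep]
    obtain ⟨c', q', r', hrec⟩ := ih (by omega) (ans + (F (nums.drop j) k : Int)) q3 hq3
      (by rw [hexp3, hm'F])
    refine ⟨c', q', r', ?_⟩
    rw [hrec]
    rw [List.range_succ]
    simp only [List.map_append, List.sum_append, List.map_cons, List.map_nil, List.sum_cons,
      List.sum_nil]
    congr 1
    ring

theorem solve_eq_sum (nums : List Int) (k : Int) (hk : 0 ≤ k) :
    solve nums k = ((List.range nums.length).map (fun l => (F (nums.drop l) k : Int))).sum := by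
  have hF0 : F (nums.drop nums.length) k = 0 := by
    rw [List.drop_length]
    unfold F
    simp
  obtain ⟨c', q', r', h⟩ := foldA_spec nums k hk nums.length le_rfl 0 [] (by simp)
    (by rw [hF0]; simp [expand])
  unfold solve
  rw [hF0] at h
  simp only [cst_zero] at h
  simp only [Nat.cast_zero, add_zero] at h
  simp only [h]
  simp

theorem innerB_run (nums : List Int) (k : Int) (hk : 0 ≤ k) (l : Nat) (hl : l < nums.length) :
    ∀ (fuel j : Nat) (ans : Int) (hj : l + j ≤ nums.length),
      nums.length - (l + j) ≤ fuel →
      j ≤ F (nums.drop l) k →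
      innerB nums k (nums.length : Int) fuel ((l + j : Nat) : Int)
        ((pm (nums.drop l))[j - 1]'(by rw [pm_length, List.length_drop]; omega))
        (cst (nums.drop l) j) ans
      = ans + ((F (nums.drop l) k : Int) - (j : Int)) := by
  intro fuel
  induction fuel with
  | zero =>
    intro j ans hj hfuel hjF
    have hF : F (nums.drop l) k ≤ nums.length - l := by
      have := F_le (nums.drop l) k; rwa [List.length_drop] at this
    have : j = F (nums.drop l) k := by omega
    subst this
    simp [innerB]
  | succ fuel ih =>
    intro j ans hj hfuel hjF
    have hF : F (nums.drop l) k ≤ nums.length - l := by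
      have := F_le (nums.drop l) k; rwa [List.length_drop] at this
    by_cases hin : l + j < nums.length
    · have hcond : ((l + j : Nat) : Int) < (nums.length : Int) := by exact_mod_cast hin
      have hslen : j < (nums.drop l).length := by rw [List.length_drop]; omega
      have hv : PySem.List.pyGetD nums ((l + j : Nat) : Int) 0 = (nums.drop l)[j] := by
        rw [PySem.List.pyGetD_natCast, List.getD_eq_getElem nums 0 hin, List.getElem_drop]
      have hmx' :
          (if (nums.drop l)[j] > (pm (nums.drop l))[j - 1]'(by rw [pm_length, List.length_drop]; omega)
           then (nums.drop l)[j]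
           else (pm (nums.drop l))[j - 1]'(by rw [pm_length, List.length_drop]; omega))
          = (pm (nums.drop l))[j]'(by rw [pm_length]; exact hslen) := by
        cases j with
        | zero =>
          have h0 := pm_get_zero (nums.drop l) (by omega)
          simp only [Nat.zero_sub, h0]
          simp
        | succ jj =>
          have hsucc := pm_get_succ (nums.drop l) jj hslen
          simp only [Nat.add_sub_cancel]
          rw [hsucc]
          by_cases hle : (nums.drop l)[jj+1] ≤ (pm (nums.drop l))[jj]'(by rw [pm_length]; omega)
          · rw [if_neg (by omega), max_eq_left hle]
          · rw [if_pos (by omega), max_eq_right (by omega)]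
      have hcost : cst (nums.drop l) j
            + ((pm (nums.drop l))[j]'(by rw [pm_length]; exact hslen) - (nums.drop l)[j])
          = cst (nums.drop l) (j + 1) := by
        rw [cst_succ (nums.drop l) j hslen]
      rw [innerB, if_pos hcond]
      simp only [hv, hmx', hcost]
      by_cases hbr : cst (nums.drop l) (j + 1) > k
      · rw [if_pos hbr]
        have hFj : j = F (nums.drop l) k := by
          apply F_char (nums.drop l) k hk j (by omega)
          · exact le_trans (cst_le_of_le _ j _ hjF (by rw [List.length_drop]; omega)) (F_feas _ k hk)
          · exact Or.inr (by omega)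
        rw [← hFj]; ring
      · rw [if_neg hbr]
        have hj1F : j + 1 ≤ F (nums.drop l) k :=
          le_F _ k (j+1) (by rw [List.length_drop]; omega) (by omega)
        have hcast : ((l + j : Nat) : Int) + 1 = ((l + (j + 1) : Nat) : Int) := by push_cast; ring
        have := ih (j+1) (ans + 1) (by omega) (by omega) hj1F
        simp only [Nat.add_sub_cancel] at this
        rw [hcast, this]
        push_cast
        ring
    · have hcond : ¬ ((l + j : Nat) : Int) < (nums.length : Int) := by exact_mod_cast hin
      have : j = F (nums.drop l) k := by omega
      subst this
      rw [innerB, if_neg hcond]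
      simp

theorem foldl_sum_spec (f : Int → Nat → Int) (g : Nat → Int) :
    ∀ (L : List Nat), (∀ x ∈ L, ∀ a : Int, f a x = a + g x) → ∀ a : Int,
      L.foldl f a = a + (L.map g).sum := by
  intro L
  induction L with
  | nil => intro _ a; simp
  | cons x xs ih =>
    intro h a
    simp only [List.foldl_cons, List.map_cons, List.sum_cons]
    rw [h x (by simp) a, ih (fun y hy => h y (by simp [hy]))]
    ring

theorem solve_alt_eq_sum (nums : List Int) (k : Int) (hk : 0 ≤ k) :
    solve_alt nums k = ((List.range nums.length).map (fun l => (F (nums.drop l) k : Int))).sum := by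
  unfold solve_alt
  simp only [PySem.List.pyRange_zero_nat, List.foldl_map]
  refine (foldl_sum_spec _ _ _ ?_ 0).trans (zero_add _)
  intro l hl a
  have hl' : l < nums.length := List.mem_range.mp hl
  have hmx : PySem.List.pyGetD nums (l : Int) 0
      = (pm (nums.drop l))[0 - 1]'(by rw [pm_length, List.length_drop]; omega) := by
    have h0 := pm_get_zero (nums.drop l) (by rw [List.length_drop]; omega)
    simp only [Nat.zero_sub, h0]
    rw [PySem.List.pyGetD_natCast, List.getD_eq_getElem nums 0 hl', List.getElem_drop]
    simp
  have := innerB_run nums k hk l hl' nums.length 0 a (by omega) (by omega) (by omega)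
  simp only [Nat.add_zero, cst_zero] at this
  rw [hmx, this]
  simp

-- ===== VERDICT (by name: the statement is the Claim_ definition above) =====
theorem solve_spec : Claim_equal_solve := by
  intro nums k _ hpre
  unfold Spec_solve
  rcases hpre with hk | hnil
  · rw [solve_eq_sum nums k hk, solve_alt_eq_sum nums k hk]
  · subst hnil; rfl

theorem solve_raises : Claim_raises_solve := by
  unfold Claim_raises_solve
  constructor
  · intro nums k _ hr hpre
    rcases hr with ⟨hk', hne⟩
    rcases hpre with hk | hnil
    · omega
    · exact hne hnil
  · exact ⟨by decide, by decide, by decide⟩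

-- self-check of the raise witness (keeps the checked fact visible in the file):
-- at pvRaiseWitness_solve, B's port returns pvRaiseWitnessOut_solve
theorem pvRaiseWitnessOut_solve_ok :
    solve_alt pvRaiseWitness_solve.1 pvRaiseWitness_solve.2 = pvRaiseWitnessOut_solve :=
  solve_raises.2.2.2
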